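-- pv_equiv track=rewrite | github.com/TraceofLight/BOJ_solved | 백준/Silver/1312. 소수/소수.py | find_target_degit
-- ===== SOURCE A (Python) =====
-- def find_target_degit(denominator, numerator, target_digit):
--     """
--     나눗셈을 실행했을 때, 소숫점 아래 N번째 자릿수를 구하는 함수
--     """
--
--     # 정수 부분 우선 처리
--     denominator %= numerator
--
--     # 카운팅 변수 선언
--     counter = 0
--
--     # 목표 자릿수까지 반복
--     while counter <= target_digit:
--
--         # 나눌 수 없는 경우 자릿수 추가 제공 및 카운팅
--         while counter <= target_digit and denominator < numerator:
--             denominator *= 10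
--             counter += 1
--
--             # 나눌 수 없는 상태에서 목표 자릿수에 도달했다면 0 반환
--             if counter == target_digit and denominator < numerator:
--                 return 0
--
--         # 목표 자릿수에 도달한 경우 나눈 몫을 반환
--         if counter == target_digit:
--             result = denominator // numerator
--             return result
--
--         # 도달하지 않은 경우 나눠준 후 다시 반복
--         else:
--             denominator %= numerator
-- ===== SOURCE B (Python) =====
-- def find_target_degit(denominator, numerator, target_digit):
--     # O(log target_digit): the N-th decimal digit of denominator/numerator is
--     # (r * 10^(N-1) mod numerator) * 10 // numerator, with the power taken modularly.
--     remainder = denominator % numerator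
--     remainder = remainder * pow(10, target_digit - 1, numerator) % numerator
--     return remainder * 10 // numerator
-- ===== Notes on version B (the rewrite author's own statement) =====
-- stated objective: faster
-- what changed: Replaces A's digit-by-digit long-division loop (one multiply-and-reduce step per decimal place) with a closed form using modular exponentiation: digit = (d%n * pow(10, N-1, n)) % n * 10 // n.
-- outside the precondition, e.g. on find_target_degit(1, 3, 0): A returns None, B returns 3; on find_target_degit(5, -3, 0): A returns 0, B returns 3
import Mathlib
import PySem

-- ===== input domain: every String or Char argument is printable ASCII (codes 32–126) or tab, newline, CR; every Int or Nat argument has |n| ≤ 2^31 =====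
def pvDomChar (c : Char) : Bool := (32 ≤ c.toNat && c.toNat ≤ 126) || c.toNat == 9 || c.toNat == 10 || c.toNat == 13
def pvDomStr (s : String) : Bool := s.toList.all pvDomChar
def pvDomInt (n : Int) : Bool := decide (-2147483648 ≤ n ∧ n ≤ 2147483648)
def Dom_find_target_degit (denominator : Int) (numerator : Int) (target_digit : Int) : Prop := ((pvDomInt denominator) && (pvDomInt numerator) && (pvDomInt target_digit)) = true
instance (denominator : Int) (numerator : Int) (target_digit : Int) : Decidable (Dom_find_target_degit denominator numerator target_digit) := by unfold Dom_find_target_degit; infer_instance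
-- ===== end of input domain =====

-- B replaces A's O(N) long-division loop by the closed form (d%n * 10^(N-1) mod n) * 10 // n
-- with modular exponentiation (O(log N)); equal on numerator ≥ 1 ∧ target_digit ≥ 1.


-- ===== PORT A =====
-- inner `while counter <= target_digit and denominator < numerator` loop of A
-- (fuel only makes it total; .inl = the early `return 0`, .inr = loop exit state)
def pvInnerA (n t : Int) : Nat → Int → Int → Sum Int (Int × Int)
  | 0, d, c => .inr (d, c)
  | f+1, d, c =>
    if c ≤ t ∧ d < n then
      let d' := d * 10
      let c' := c + 1
      if c' = t ∧ d' < n then .inl 0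
      else pvInnerA n t f d' c'
    else .inr (d, c)

-- outer `while counter <= target_digit` loop of A (falling off the loop = Python's
-- implicit `return None`, outside the claimed precondition; rendered as 0)
def pvOuterA (n t : Int) : Nat → Int → Int → Int
  | 0, _, _ => 0
  | g+1, d, c =>
    if c ≤ t then
      match pvInnerA n t (g+1) d c with
      | .inl r => r
      | .inr (d', c') =>
        if c' = t then PySem.Int.floordiv d' n
        else pvOuterA n t g (PySem.Int.mod d' n) c'
    else 0

def find_target_degit (denominator : Int) (numerator : Int) (target_digit : Int) : Int :=
  pvOuterA numerator target_digit (target_digit.toNat + 2)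
    (PySem.Int.mod denominator numerator) 0

-- ===== PORT B =====
def find_target_degit_alt (denominator : Int) (numerator : Int) (target_digit : Int) : Int :=
  let remainder := PySem.Int.mod denominator numerator
  let remainder := PySem.Int.mod
    (remainder * PySem.Int.powMod 10 (target_digit - 1).toNat numerator) numerator
  PySem.Int.floordiv (remainder * 10) numerator

-- ===== PRECONDITION & SPEC =====
-- Pre_ excludes numerator ≤ 0 (A raises ZeroDivisionError at 0, loops forever for a negative
-- numerator with positive target_digit, and returns an accidental quotient only at
-- target_digit = 0) and target_digit ≤ 0, where A falls off its loop and returns None, not an int.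
def Pre_find_target_degit (denominator : Int) (numerator : Int) (target_digit : Int) : Prop :=
  1 ≤ numerator ∧ 1 ≤ target_digit
instance (denominator : Int) (numerator : Int) (target_digit : Int) : Decidable (Pre_find_target_degit denominator numerator target_digit) := by unfold Pre_find_target_degit; infer_instance

def pvWitness_find_target_degit : Int × Int × Int := (1, 7, 3)

def Spec_find_target_degit (denominator : Int) (numerator : Int) (target_digit : Int) (out : Int) : Prop := out = find_target_degit_alt denominator numerator target_digit
instance (denominator : Int) (numerator : Int) (target_digit : Int) (out : Int) : Decidable (Spec_find_target_degit denominator numerator target_digit out) := by unfold Spec_find_target_degit; infer_instance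

-- ===== CLAIM (what is proved, stated in full; the proofs are below) =====
def Claim_equal_find_target_degit : Prop := ∀ (denominator : Int) (numerator : Int) (target_digit : Int), Dom_find_target_degit denominator numerator target_digit → Pre_find_target_degit denominator numerator target_digit → Spec_find_target_degit denominator numerator target_digit (find_target_degit denominator numerator target_digit)

-- ===== LEMMAS AND PROOFS =====

-- common reference value: remainder after k multiply-by-10-and-reduce steps, then the quotient digit
def pvG (n : Int) : Nat → Int → Int
  | 0, d => PySem.Int.floordiv (10 * d) n
  | k+1, d => pvG n k (PySem.Int.mod (10 * d) n)

theorem pvInnerA_exit (n t : Int) (f : Nat) (d c : Int) (h : ¬ d < n) :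
    pvInnerA n t f d c = .inr (d, c) := by
  cases f with
  | zero => rfl
  | succ f => simp [pvInnerA, h]

-- main invariant: from a loop state (d, c) with 0 ≤ d < n and k+1 digits still to produce
-- (c = t - 1 - k), A's interleaved loops compute pvG n k d
theorem pvMain (n t : Int) (hn : 1 ≤ n) :
    ∀ (k f g : Nat) (d c : Int), 0 ≤ d → d < n → c = t - 1 - (k : Int) →
      k + 1 ≤ f → k ≤ g →
      (match pvInnerA n t f d c with
       | .inl r => r
       | .inr (d', c') =>
         if c' = t then PySem.Int.floordiv d' n
         else pvOuterA n t g (PySem.Int.mod d' n) c') = pvG n k d := by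
  intro k
  induction k with
  | zero =>
    intro f g d c hd0 hdn hc hf hg
    obtain ⟨f, rfl⟩ : ∃ f', f = f' + 1 := ⟨f - 1, by omega⟩
    have hcond : c ≤ t ∧ d < n := ⟨by omega, hdn⟩
    by_cases hsmall : d * 10 < n
    · have : c + 1 = t ∧ d * 10 < n := ⟨by omega, hsmall⟩
      simp only [pvInnerA, if_pos hcond, if_pos this]
      have h0 : PySem.Int.floordiv (10 * d) n = 0 := by
        rw [PySem.Int.floordiv_eq_iff_of_pos (by omega)]
        constructor <;> nlinarith
      simp [pvG, h0]
    · simp only [pvInnerA, if_pos hcond]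
      rw [if_neg (by tauto), pvInnerA_exit n t f _ _ hsmall]
      simp only [if_pos (show c + 1 = t by omega)]
      simp [pvG, mul_comm]
  | succ k ih =>
    intro f g d c hd0 hdn hc hf hg
    obtain ⟨f, rfl⟩ : ∃ f', f = f' + 1 := ⟨f - 1, by omega⟩
    have hcond : c ≤ t ∧ d < n := ⟨by omega, hdn⟩
    have hct : ¬ (c + 1 = t ∧ d * 10 < n) := by rintro ⟨h1, -⟩; omega
    simp only [pvInnerA, if_pos hcond, if_neg hct]
    by_cases hsmall : d * 10 < n
    · have := ih f g (d * 10) (c + 1) (by positivity) hsmall (by omega)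
        (by omega) (by omega)
      rw [this]
      have hid : PySem.Int.mod (d * 10) n = d * 10 := by
        rw [PySem.Int.mod_eq_emod_of_pos (by omega), Int.emod_eq_of_lt (by positivity) hsmall]
      simp [pvG, hid, mul_comm]
    · rw [pvInnerA_exit n t f _ _ hsmall]
      simp only [if_neg (show ¬ (c + 1 = t) by omega)]
      obtain ⟨g, rfl⟩ : ∃ g', g = g' + 1 := ⟨g - 1, by omega⟩
      simp only [pvOuterA, if_pos (show c + 1 ≤ t by omega)]
      have := ih (g + 1) g (PySem.Int.mod (d * 10) n) (c + 1)
        (PySem.Int.mod_nonneg _ (by omega)) (PySem.Int.mod_lt _ (by omega))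
        (by omega) (by omega) (by omega)
      rw [this]
      simp [pvG, mul_comm]

-- pvG in closed form
theorem pvG_closed (n : Int) (hn : 1 ≤ n) :
    ∀ (k : Nat) (r : Int), 0 ≤ r → r < n →
      pvG n k r = PySem.Int.floordiv (10 * ((r * 10 ^ k) % n)) n := by
  intro k
  induction k with
  | zero =>
    intro r hr0 hrn
    simp [pvG, Int.emod_eq_of_lt hr0 hrn]
  | succ k ih =>
    intro r hr0 hrn
    have hmod : PySem.Int.mod (10 * r) n = (10 * r) % n :=
      PySem.Int.mod_eq_emod_of_pos (by omega)
    have h1 := ih ((10 * r) % n) (Int.emod_nonneg _ (by omega))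
      (Int.emod_lt_of_pos _ (by omega))
    have h2 : ((10 * r) % n * 10 ^ k) % n = (r * 10 ^ (k + 1)) % n := by
      rw [Int.mul_emod, Int.emod_emod_of_dvd _ dvd_rfl, ← Int.mul_emod]
      ring_nf
    simp only [pvG, hmod, h1, h2]

-- ===== VERDICT (by name: the statement is the Claim_ definition above) =====
theorem find_target_degit_spec : Claim_equal_find_target_degit := by
  intro d n t _ hpre
  obtain ⟨hn, ht⟩ := hpre
  unfold Spec_find_target_degit find_target_degit find_target_degit_alt
  have hmodd : 0 ≤ PySem.Int.mod d n ∧ PySem.Int.mod d n < n :=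
    ⟨PySem.Int.mod_nonneg _ (by omega), PySem.Int.mod_lt _ (by omega)⟩
  -- unfold one step of the outer loop and apply the main invariant with k = t - 1
  have hk : (0 : Int) = t - 1 - ((t - 1).toNat : Int) := by omega
  have hmain := pvMain n t hn (t - 1).toNat (t.toNat + 1 + 1) (t.toNat + 1)
    (PySem.Int.mod d n) 0 hmodd.1 hmodd.2 hk (by omega) (by omega)
  rw [show t.toNat + 2 = t.toNat + 1 + 1 from rfl, pvOuterA,
    if_pos (show (0:Int) ≤ t by omega), hmain, pvG_closed n hn _ _ hmodd.1 hmodd.2]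
  have hpos : (0:Int) < n := by omega
  rw [PySem.Int.powMod_eq_emod _ _ hpos]
  simp only [PySem.Int.mod_eq_emod_of_pos hpos]
  have h3 : d % n * (10 ^ (t - 1).toNat % n) % n = d % n * 10 ^ (t - 1).toNat % n := by
    conv_rhs => rw [Int.mul_emod, Int.emod_emod_of_dvd _ dvd_rfl]
  rw [h3, mul_comm]
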